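-- pv_equiv track=rewrite | github.com/Austinll0/AdventOfCode | 2025/Day06/Day06.py | part1
-- ===== SOURCE A (Python) =====
-- def part1(nums,ops):
--     ans = [];
--     out = 0;
--     for o in ops:
--         if o == "*": ans.append(1)
--         else: ans.append(0)
--
--     for i in range(len(nums)):
--         n = nums[i]
--         k = i % len(ops)
--         o = ops[k]
--         if o == "+": ans[k] += n
--         else: ans[k] *= n
--     for n in ans:
--         out += n
--     return out
-- ===== SOURCE B (Python) =====
-- def part1(nums, ops):
--     m = len(ops)
--     total = 0
--     for k, o in enumerate(ops):
--         group = nums[k::m]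
--         if o == "+":
--             total += sum(group)
--         elif o == "*":
--             p = 1
--             for g in group:
--                 p *= g
--             total += p
--     return total
-- ===== Notes on version B (the rewrite author's own statement) =====
-- stated objective: simpler
-- what changed: Instead of A's seeded per-slot accumulator array updated in one indexed pass and then summed, B iterates over the op slots, takes each slot's group as the stride slice nums[k::len(ops)], reduces it with sum or a product, and adds the reductions.
import Mathlib
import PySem

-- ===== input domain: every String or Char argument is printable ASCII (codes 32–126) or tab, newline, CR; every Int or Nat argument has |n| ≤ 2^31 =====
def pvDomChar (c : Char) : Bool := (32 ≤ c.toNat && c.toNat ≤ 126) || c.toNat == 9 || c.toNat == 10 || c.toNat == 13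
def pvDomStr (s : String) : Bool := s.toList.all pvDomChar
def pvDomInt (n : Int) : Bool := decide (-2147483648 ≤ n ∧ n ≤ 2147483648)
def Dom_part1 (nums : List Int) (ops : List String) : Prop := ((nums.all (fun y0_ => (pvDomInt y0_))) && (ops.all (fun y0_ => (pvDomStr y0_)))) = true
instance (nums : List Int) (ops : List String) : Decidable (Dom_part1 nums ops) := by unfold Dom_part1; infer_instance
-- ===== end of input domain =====

-- B iterates over op slots, reducing each stride slice nums[k::len(ops)] with sum or a product; simpler decomposition, same result wherever A returns.
-- ===== PORT A =====
def part1 (nums : List Int) (ops : List String) : Int :=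
  let ans : List Int := ops.foldl (fun ans o => ans ++ [if o == "*" then (1 : Int) else 0]) []
  let ans := (PySem.List.pyRange 0 (nums.length : Int) 1).foldl (fun ans i =>
      let n := PySem.List.pyGetD nums i 0
      let k := PySem.Int.mod i (ops.length : Int)
      let o := PySem.List.pyGetD ops k ""
      if o == "+" then PySem.List.pySetD ans k (PySem.List.pyGetD ans k 0 + n)
      else PySem.List.pySetD ans k (PySem.List.pyGetD ans k 0 * n)) ans
  ans.foldl (fun out n => out + n) 0

-- ===== PORT B =====
def part1_alt (nums : List Int) (ops : List String) : Int :=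
  let m := ops.length
  (PySem.List.enumerate ops 0).foldl (fun total ko =>
      let group := (PySem.List.slice? nums (some ko.1) none (m : Int)).getD []
      if ko.2 == "+" then total + group.sum
      else if ko.2 == "*" then total + group.foldl (· * ·) 1
      else total) 0

-- ===== PRECONDITION & SPEC =====
-- Pre_ excludes exactly ops = [] with nums ≠ [], where A raises ZeroDivisionError on i % len(ops).
def Pre_part1 (nums : List Int) (ops : List String) : Prop := ops ≠ [] ∨ nums = []
instance (nums : List Int) (ops : List String) : Decidable (Pre_part1 nums ops) := by unfold Pre_part1; infer_instance
def pvWitness_part1 : List Int × List String := ([3, -1, 4, 1], ["+", "*"])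

def Spec_part1 (nums : List Int) (ops : List String) (out : Int) : Prop := out = part1_alt nums ops
instance (nums : List Int) (ops : List String) (out : Int) : Decidable (Spec_part1 nums ops out) := by unfold Spec_part1; infer_instance

-- ===== CLAIM (what is proved, stated in full; the proofs are below) =====
def Claim_equal_part1 : Prop := ∀ (nums : List Int) (ops : List String), Dom_part1 nums ops → Pre_part1 nums ops → Spec_part1 nums ops (part1 nums ops)
-- ===== LEMMAS AND PROOFS =====
-- proof helpers
def bodyA (nums : List Int) (ops : List String) (ans : List Int) (i : Int) : List Int :=
  let n := PySem.List.pyGetD nums i 0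
  let k := PySem.Int.mod i (ops.length : Int)
  let o := PySem.List.pyGetD ops k ""
  if o == "+" then PySem.List.pySetD ans k (PySem.List.pyGetD ans k 0 + n)
  else PySem.List.pySetD ans k (PySem.List.pyGetD ans k 0 * n)

def loopA (ops : List String) : Nat → List Int → List Int → List Int
  | _, [], ans => ans
  | s, x :: xs, ans =>
      let k := s % ops.length
      loopA ops (s+1) xs
        (if ops.getD k "" == "+" then ans.set k (ans.getD k 0 + x) else ans.set k (ans.getD k 0 * x))

def grp (m k : Nat) : Nat → List Int → List Int
  | _, [] => []
  | s, x :: xs => if s % m = k then x :: grp m k (s+1) xs else grp m k (s+1) xs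

def stepK (ops : List String) (k : Nat) (a x : Int) : Int :=
  if ops.getD k "" == "+" then a + x else a * x

def contr (nums : List Int) (ops : List String) (ko : Int × String) : Int :=
  let group := (PySem.List.slice? nums (some ko.1) none (ops.length : Int)).getD []
  if ko.2 == "+" then group.sum
  else if ko.2 == "*" then group.foldl (· * ·) 1
  else 0

lemma part1_eq (nums ops) : part1 nums ops =
    ((PySem.List.pyRange 0 (nums.length : Int) 1).foldl (bodyA nums ops)
      (ops.foldl (fun ans o => ans ++ [if o == "*" then (1 : Int) else 0]) [])).foldl
      (fun out n => out + n) 0 := rfl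

lemma bridgeA (ops : List String) (pre xs : List Int) (ans : List Int) :
    (PySem.List.pyRange (pre.length : Int) ((pre.length + xs.length : Nat) : Int) 1).foldl
      (bodyA (pre ++ xs) ops) ans = loopA ops pre.length xs ans := by
  induction xs generalizing pre ans with
  | nil => simp [PySem.List.pyRange_one_eq_nil, loopA]
  | cons x xs ih =>
    rw [PySem.List.pyRange_one_cons (by exact_mod_cast Nat.lt_add_of_pos_right (by simp))]
    rw [List.foldl_cons]
    have hb : bodyA (pre ++ x :: xs) ops ans (pre.length : Int) =
        (if ops.getD (pre.length % ops.length) "" == "+" then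
          ans.set (pre.length % ops.length) (ans.getD (pre.length % ops.length) 0 + x)
        else ans.set (pre.length % ops.length) (ans.getD (pre.length % ops.length) 0 * x)) := by
      simp only [bodyA, PySem.Int.mod_natCast, PySem.List.pyGetD_natCast, PySem.List.pySetD_natCast]
      simp [List.getD]
    rw [hb]
    set ans' := (if ops.getD (pre.length % ops.length) "" == "+" then
          ans.set (pre.length % ops.length) (ans.getD (pre.length % ops.length) 0 + x)
        else ans.set (pre.length % ops.length) (ans.getD (pre.length % ops.length) 0 * x)) with hans'
    have e0 : ((pre.length : Int) + 1) = (((pre ++ [x]).length : Nat) : Int) := by simp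
    have e1 : ((pre.length + (x :: xs).length : Nat) : Int) = (((pre ++ [x]).length + xs.length : Nat) : Int) := by
      simp; ring
    rw [e0, e1]
    have := ih (pre ++ [x]) ans'
    rw [List.append_assoc] at this
    simp only [List.singleton_append] at this
    rw [this]
    have e2 : (pre ++ [x]).length = pre.length + 1 := by simp
    rw [e2, loopA]

lemma loopA_length (ops : List String) (xs : List Int) (s : Nat) (ans : List Int) :
    (loopA ops s xs ans).length = ans.length := by
  induction xs generalizing s ans with
  | nil => simp [loopA]
  | cons x xs ih => rw [loopA, ih]; split <;> simp

lemma loopA_getD (ops : List String) (hm : ops ≠ []) (xs : List Int) (s : Nat) (ans : List Int)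
    (h : ans.length = ops.length) (k : Nat) (hk : k < ops.length) :
    (loopA ops s xs ans).getD k 0 =
      (grp ops.length k s xs).foldl (stepK ops k) (ans.getD k 0) := by
  induction xs generalizing s ans with
  | nil => simp [loopA, grp]
  | cons x xs ih =>
    have hmpos : 0 < ops.length := List.length_pos_iff.mpr hm
    rw [loopA, grp]
    have hklt : k < ans.length := h ▸ hk
    by_cases hsk : s % ops.length = k
    · rw [if_pos hsk, List.foldl_cons, hsk]
      rw [ih (s+1) _ (by split <;> simp [h])]
      congr 1
      rw [stepK]
      split <;> simp [List.getD, hklt]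
    · rw [if_neg hsk]
      rw [ih (s+1) _ (by split <;> simp [h])]
      congr 1
      split <;> simp [List.getD, List.getElem?_set_ne hsk]

lemma lt_div_iff' (m j q : ℕ) (hm : 0 < m) : j < q/m ↔ (j+1)*m ≤ q := by
  constructor
  · intro h
    calc (j+1)*m ≤ (q/m)*m := Nat.mul_le_mul_right m (Nat.succ_le_of_lt h)
    _ ≤ q := Nat.div_mul_le_self q m
  · intro h
    have : j + 1 ≤ q / m := (Nat.le_div_iff_mul_le hm).mpr h
    omega

lemma cnt_iff (m j n k : ℕ) (hm : 0 < m) : j < (n - k + m - 1)/m ↔ k + m*j < n := by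
  rw [lt_div_iff' m j _ hm, Nat.add_mul, Nat.one_mul, Nat.mul_comm j m]
  omega

lemma filter_range_eq (n m k : ℕ) (hm : 0 < m) (hk : k < m) :
    (List.range n).filter (fun i => i % m = k) =
      (List.range ((n - k + m - 1)/m)).map (fun j => k + m*j) := by
  have hnd1 : ((List.range n).filter (fun i => i % m = k)).Nodup := (List.nodup_range).filter _
  have hnd2 : ((List.range ((n - k + m - 1)/m)).map (fun j => k + m*j)).Nodup :=
    (List.nodup_range).map (fun a b h => Nat.eq_of_mul_eq_mul_left hm (by omega : m*a = m*b))
  have hperm := (List.perm_ext_iff_of_nodup hnd1 hnd2).mpr ?_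
  · refine List.Perm.eq_of_pairwise (le := (· < ·)) (fun a b _ _ h1 h2 => by omega) ?_ ?_ hperm
    · exact List.Pairwise.filter _ (List.pairwise_lt_range)
    · rw [List.pairwise_map]
      exact List.pairwise_lt_range.imp (fun h =>
        Nat.add_lt_add_left ((Nat.mul_lt_mul_left hm).mpr h) k)
  · intro i
    simp only [List.mem_filter, List.mem_range, List.mem_map, decide_eq_true_eq]
    constructor
    · rintro ⟨hin, hmod⟩
      have hdm := Nat.div_add_mod i m
      exact ⟨i / m, (cnt_iff m _ n k hm).mpr (by omega), by omega⟩
    · rintro ⟨j, hj, rfl⟩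
      have := (cnt_iff m j n k hm).mp hj
      refine ⟨by omega, ?_⟩
      simp [Nat.add_mul_mod_self_left, Nat.mod_eq_of_lt hk]

lemma grp_eq_range (m k : ℕ) (xs : List Int) : ∀ (s : ℕ),
    grp m k s xs = ((List.range xs.length).filter (fun i => (s + i) % m = k)).map (fun i => xs.getD i 0) := by
  induction xs with
  | nil => intro s; simp [grp]
  | cons x xs ih =>
    intro s
    rw [grp, List.length_cons, List.range_succ_eq_map, List.filter_cons]
    rw [List.filter_map]
    have hc : (fun i => decide ((s + i) % m = k)) ∘ Nat.succ = (fun i => decide (((s+1) + i) % m = k)) := by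
      funext i; simp [Nat.succ_eq_add_one]; constructor <;> (intro h; rw [← h]; ring_nf)
    have hg : ((fun i => (x :: xs).getD i 0) ∘ Nat.succ) = (fun i => xs.getD i 0) := by
      funext i; simp
    by_cases hsk : s % m = k
    · simp only [Nat.add_zero, hsk, decide_true, if_true, List.map_cons, List.map_map, hc, hg]
      simp [ih (s+1)]
    · simp only [Nat.add_zero, hsk, decide_false, Bool.false_eq_true, if_false, List.map_map, hc, hg]
      simp [ih (s+1)]

lemma slice_stride (xs : List Int) (m k : ℕ) (hm : 0 < m) (hk : k < m) :
    PySem.List.slice? xs (some (k:Int)) none (m:Int) = some (grp m k 0 xs) := by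
  rw [PySem.List.slice?, PySem.List.sliceIndices]
  have hmz : ¬ ((m:Int) = 0) := by omega
  have hms : ¬ ((m:Int) < 0) := by omega
  have hk0 : ¬ ((k:Int) < 0) := by omega
  have hmp : (0:Int) < (m:Int) := by omega
  simp only [hmz, hms, hk0, hmp, if_false, if_true]
  by_cases hkn : k < xs.length
  · have hmin : min (k:Int) (xs.length:Int) = (k:Int) := by omega
    have hlt : ((k:Int) < (xs.length:Int)) := by omega
    simp only [hmin, hlt, if_true]
    have hcast : ((xs.length:Int) - (k:Int) + (m:Int) - 1) = ((xs.length - k + m - 1 : ℕ) : ℤ) := by omega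
    rw [hcast, (Int.natCast_ediv _ _).symm, Int.toNat_natCast]
    congr 1
    rw [(List.filterMap_eq_map_iff_forall_eq_some (g := fun j => xs.getD (k + m*j) 0)).mpr ?_]
    · rw [grp_eq_range]
      simp only [Nat.zero_add]
      rw [filter_range_eq xs.length m k hm hk, List.map_map]
      rfl
    · intro j hj
      rw [List.mem_range] at hj
      have hidx : k + m*j < xs.length := (cnt_iff m j xs.length k hm).mp hj
      have ht : ((k:Int) + (m:Int)*(j:Int)).toNat = k + m*j := by omega
      rw [ht, List.getElem?_eq_getElem hidx, List.getD_eq_getElem _ _ hidx]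
  · have hmin : min (k:Int) (xs.length:Int) = (xs.length:Int) := by omega
    have hlt : ¬ ((xs.length:Int) < (xs.length:Int)) := by omega
    simp only [hmin, hlt, if_false, List.range_zero, List.filterMap_nil]
    congr 1
    rw [grp_eq_range]
    simp only [Nat.zero_add]
    have : (List.range xs.length).filter (fun i => i % m = k) = [] := by
      rw [List.filter_eq_nil_iff]
      intro i hi
      rw [List.mem_range] at hi
      have : i % m = i := Nat.mod_eq_of_lt (by omega)
      simp [this]; omega
    rw [this, List.map_nil]

lemma foldl_mul_zero (l : List Int) : l.foldl (· * ·) 0 = 0 := by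
  induction l with
  | nil => rfl
  | cons x xs ih => simpa using ih

lemma main_eq (nums : List Int) (ops : List String) (hp : ops ≠ [] ∨ nums = []) :
    part1 nums ops = part1_alt nums ops := by
  by_cases hm : ops = []
  · have hnil : nums = [] := by
      rcases hp with h | h
      · exact absurd hm h
      · exact h
    subst hm; subst hnil; rfl
  have hmpos : 0 < ops.length := List.length_pos_iff.mpr hm
  rw [part1_eq, PySem.List.foldl_append_singleton_eq_map]
  have hbr := bridgeA ops [] nums ((ops.map (fun o => if o == "*" then (1:Int) else 0)))
  simp only [List.nil_append, List.length_nil, Nat.cast_zero, Nat.zero_add] at hbr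
  simp only [List.nil_append]
  rw [hbr]
  -- B side: fold = fold of (+ contr) then map
  have hB : part1_alt nums ops =
      ((PySem.List.enumerate ops 0).map (contr nums ops)).foldl (· + ·) 0 := by
    rw [part1_alt, List.foldl_map]
    apply PySem.List.foldl_congr_mem
    intro acc ko _
    simp only [contr]
    split
    · rfl
    · split
      · rfl
      · simp
  rw [hB]
  congr 1
  -- the per-slot lists are equal
  apply List.ext_getElem
  · rw [loopA_length]; simp [PySem.List.length_enumerate]
  · intro k hk1 hk2
    have hkm : k < ops.length := by
      have := hk1; rwa [loopA_length, List.length_map] at this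
    have hlen : (ops.map (fun o => if o == "*" then (1:Int) else 0)).length = ops.length := by simp
    rw [← List.getD_eq_getElem _ 0 hk1, loopA_getD ops hm nums 0 _ hlen k hkm]
    rw [List.getElem_map, PySem.List.getElem_enumerate]
    simp only [contr]
    rw [show ((0:Int) + (k:Nat)) = ((k:Nat):Int) by ring]
    rw [slice_stride nums ops.length k hmpos hkm, Option.getD_some]
    have hinit : (ops.map (fun o => if o == "*" then (1:Int) else 0)).getD k 0 =
        (if ops[k] == "*" then (1:Int) else 0) := by
      simp [List.getD, hkm]
    rw [hinit]
    by_cases hplus : (ops[k] == "+") = true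
    · have hmul : (ops[k] == "*") = false := by simp_all
      rw [hplus, hmul]
      simp only [Bool.false_eq_true, if_true, if_false]
      have hst : stepK ops k = (· + ·) := by
        funext a b; simp [stepK, List.getD, hkm]; simp_all
      rw [hst, List.sum_eq_foldl]
    · by_cases hmul : (ops[k] == "*") = true
      · rw [Bool.not_eq_true] at hplus
        rw [hmul, hplus]
        simp only [Bool.false_eq_true, if_true, if_false]
        have hst : stepK ops k = (· * ·) := by
          funext a b; simp [stepK, List.getD, hkm]; simp_all
        rw [hst]
      · rw [Bool.not_eq_true] at hplus hmul
        rw [hplus, hmul]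
        simp only [Bool.false_eq_true, if_false]
        have hst : stepK ops k = (· * ·) := by
          funext a b; simp [stepK, List.getD, hkm]; simp_all
        rw [hst, foldl_mul_zero]

-- ===== VERDICT (by name: the statement is the Claim_ definition above) =====
theorem part1_spec : Claim_equal_part1 := by
  intro nums ops _ hp
  exact main_eq nums ops hp
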